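-- pv_equiv track=rewrite | github.com/beckmorr/mooc-fi-python-2024-exercises | Part 4/09 - First, second and last words.py | second_word
-- ===== SOURCE A (Python) =====
-- def first_word(string):
--     first = ""
--     for i in range(len(string)):
--         if string[i] == " ":
--             break
--         first += string[i]
--     return first
--
-- def second_word(string):
--     first_word_index = len(first_word(string)) + 1
--     second = ""
--     for i in range(first_word_index, len(string)):
--         if string[i] == " ":
--             break
--         second += string[i]
--     return second
-- ===== SOURCE B (Python) =====
-- def second_word(string):
--     parts = string.split(" ")
--     return parts[1] if len(parts) > 1 else ""
-- ===== Notes on version B (the rewrite author's own statement) =====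
-- stated objective: faster
-- what changed: Replaces the two index-based character scans with repeated string concatenation (first_word helper plus a second scan) by a single split on literal spaces and a guarded index of the second token.
import Mathlib
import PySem

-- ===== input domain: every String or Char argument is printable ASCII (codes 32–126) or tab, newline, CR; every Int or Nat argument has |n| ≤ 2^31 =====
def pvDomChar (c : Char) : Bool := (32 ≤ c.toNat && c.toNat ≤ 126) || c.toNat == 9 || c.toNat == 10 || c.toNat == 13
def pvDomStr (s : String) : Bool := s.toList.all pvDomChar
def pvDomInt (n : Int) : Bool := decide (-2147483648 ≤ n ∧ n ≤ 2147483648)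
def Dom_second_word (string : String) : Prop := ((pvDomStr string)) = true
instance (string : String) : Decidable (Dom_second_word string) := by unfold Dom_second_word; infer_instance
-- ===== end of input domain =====

-- B replaces the two character-by-character scans with a single split on " " and a guarded index of the second token; measured faster (A's repeated string concatenation is quadratic).

-- ===== PORT A =====
-- the scan loop shared by first_word and second_word: accumulate chars until a space (break)
def fwGo : List Char → List Char → List Char
  | [], acc => acc
  | c :: rest, acc => if c = ' ' then acc else fwGo rest (acc ++ [c])

def first_word (string : String) : String := String.ofList (fwGo string.toList [])

def second_word (string : String) : String :=
  let first_word_index := (first_word string).toList.length + 1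
  -- range(first_word_index, len(string)) indexing string[i] = the chars after dropping first_word_index
  String.ofList (fwGo (string.toList.drop first_word_index) [])

-- ===== PORT B =====
def second_word_alt (string : String) : String :=
  let parts := (PySem.Chars.splitOn string.toList [' ']).map String.ofList
  if parts.length > 1 then parts.getD 1 "" else ""

-- ===== PRECONDITION & SPEC =====
def Spec_second_word (string : String) (out : String) : Prop := out = second_word_alt string
instance (string : String) (out : String) : Decidable (Spec_second_word string out) := by unfold Spec_second_word; infer_instance

-- ===== CLAIM (what is proved, stated in full; the proofs are below) =====
def Claim_equal_second_word : Prop := ∀ (string : String), Dom_second_word string → Spec_second_word string (second_word string)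

-- ===== LEMMAS AND PROOFS =====

-- first word of a char list
def fw (cs : List Char) : List Char := cs.takeWhile (fun c => !(c == ' '))

lemma fwGo_eq (cs acc : List Char) : fwGo cs acc = acc ++ fw cs := by
  induction cs generalizing acc with
  | nil => simp [fwGo, fw]
  | cons c rest ih =>
    by_cases h : c = ' ' <;> simp [fwGo, fw, h, ih]

-- structural model of PySem.Chars.splitOn on a single-space separator
def spl : List Char → List (List Char)
  | [] => [[]]
  | c :: rest => if c = ' ' then [] :: spl rest else (spl rest).modifyHead (c :: ·)

lemma spl_ne_nil (cs : List Char) : spl cs ≠ [] := by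
  cases cs with
  | nil => simp [spl]
  | cons c rest =>
    by_cases h : c = ' ' <;> simp [spl, h]
    exact fun hc => (spl_ne_nil rest) (by simpa using congrArg List.length hc)

lemma go_spec (fuel : Nat) (l cur : List Char) (acc : List (List Char)) (h : l.length ≤ fuel) :
    PySem.Chars.splitOn.go [' '] fuel l cur acc
      = acc.reverse ++ (spl l).modifyHead (cur.reverse ++ ·) := by
  induction fuel generalizing l cur acc with
  | zero =>
    interval_cases hl : l.length
    have : l = [] := List.length_eq_zero_iff.mp hl
    subst this
    simp [PySem.Chars.splitOn.go, spl]
  | succ fuel ih =>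
    cases l with
    | nil => simp [PySem.Chars.splitOn.go, spl]
    | cons c rest =>
      by_cases hc : c = ' '
      · subst hc
        rw [show PySem.Chars.splitOn.go [' '] (fuel+1) (' ' :: rest) cur acc
              = PySem.Chars.splitOn.go [' '] fuel (List.drop 1 (' ' :: rest)) [] (cur.reverse :: acc) by
              simp [PySem.Chars.splitOn.go]]
        rw [ih _ _ _ (by simpa using Nat.le_of_succ_le_succ (by simpa using h))]
        simp only [spl, List.reverse_cons, List.append_assoc]
        obtain ⟨t, ts, ht⟩ : ∃ t ts, spl rest = t :: ts := by
          cases hsr : spl rest with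
          | nil => exact absurd hsr (spl_ne_nil rest)
          | cons t ts => exact ⟨t, ts, rfl⟩
        simp [ht, List.modifyHead]
      · rw [show PySem.Chars.splitOn.go [' '] (fuel+1) (c :: rest) cur acc
              = PySem.Chars.splitOn.go [' '] fuel rest (c :: cur) acc by
              simp [PySem.Chars.splitOn.go, List.isPrefixOf, Ne.symm hc]]
        rw [ih _ _ _ (Nat.le_of_succ_le_succ (by simpa using h))]
        obtain ⟨t, ts, ht⟩ : ∃ t ts, spl rest = t :: ts := by
          cases hs : spl rest with
          | nil => exact absurd hs (spl_ne_nil rest)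
          | cons t ts => exact ⟨t, ts, rfl⟩
        simp [spl, hc, ht, List.modifyHead]

lemma splitOn_eq_spl (cs : List Char) : PySem.Chars.splitOn cs [' '] = spl cs := by
  rw [PySem.Chars.splitOn, go_spec _ _ _ _ (Nat.le_succ _)]
  obtain ⟨t, ts, ht⟩ : ∃ t ts, spl cs = t :: ts := by
    cases hs : spl cs with
    | nil => exact absurd hs (spl_ne_nil cs)
    | cons t ts => exact ⟨t, ts, rfl⟩
  simp [ht, List.modifyHead]

lemma spl_structure (cs : List Char) :
    spl cs = fw cs :: (if ' ' ∈ cs then spl (cs.drop ((fw cs).length + 1)) else []) := by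
  induction cs with
  | nil => simp [spl, fw]
  | cons c rest ih =>
    by_cases h : c = ' '
    · subst h; simp [spl, fw]
    · rw [spl, if_neg h, ih]
      simp only [List.modifyHead]
      have hfw : fw (c :: rest) = c :: fw rest := by simp [fw, h]
      rw [hfw]
      by_cases hs : ' ' ∈ rest <;>
        simp [hs, Ne.symm h]

lemma fw_of_no_space (cs : List Char) (h : ' ' ∉ cs) : fw cs = cs := by
  simp only [fw]
  exact List.takeWhile_eq_self_iff.mpr (fun c hc => by simp; exact fun he => h (he ▸ hc))

-- ===== VERDICT (by name: the statement is the Claim_ definition above) =====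
theorem second_word_spec : Claim_equal_second_word := by
  intro string _
  unfold Spec_second_word second_word second_word_alt first_word
  rw [splitOn_eq_spl]
  set cs := string.toList with hcs
  simp only [String.toList_ofList, fwGo_eq, List.nil_append]
  by_cases hs : ' ' ∈ cs
  · rw [spl_structure cs, if_pos hs]
    rw [spl_structure (cs.drop ((fw cs).length + 1))]
    simp [List.getD]
  · rw [spl_structure cs, if_neg hs]
    have h1 : fw cs = cs := fw_of_no_space cs hs
    have h2 : cs.drop (cs.length + 1) = [] := by
      apply List.drop_eq_nil_of_le; omega
    simp only [List.getD, fw] at *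
    simp
    intro hl
    rw [show List.takeWhile (fun c => !c == ' ') cs = cs from h1] at hl
    omega
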